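-- pv_equiv track=rewrite | github.com/minyi-k03/Coding-Test | 프로그래머스/0/120891. 369게임/369게임.py | solution
-- ===== SOURCE A (Python) =====
-- def solution(order):
--     answer = 0
--
--     order=str(order)
--
--     for i in order:
--         if i=="3":
--             answer+=1
--         elif i=="6":
--             answer+=1
--         elif i=="9":
--             answer+=1
--
--
--
--     return answer
-- ===== SOURCE B (Python) =====
-- def solution(order):
--     n = abs(order)
--     answer = 0
--     while n > 0:
--         if n % 10 in (3, 6, 9):
--             answer += 1
--         n //= 10
--     return answer
-- ===== Notes on version B (the rewrite author's own statement) =====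
-- stated objective: alternative
-- what changed: B extracts digits arithmetically (abs + repeated %10 / //10) instead of stringifying the number and scanning its characters.
import Mathlib
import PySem

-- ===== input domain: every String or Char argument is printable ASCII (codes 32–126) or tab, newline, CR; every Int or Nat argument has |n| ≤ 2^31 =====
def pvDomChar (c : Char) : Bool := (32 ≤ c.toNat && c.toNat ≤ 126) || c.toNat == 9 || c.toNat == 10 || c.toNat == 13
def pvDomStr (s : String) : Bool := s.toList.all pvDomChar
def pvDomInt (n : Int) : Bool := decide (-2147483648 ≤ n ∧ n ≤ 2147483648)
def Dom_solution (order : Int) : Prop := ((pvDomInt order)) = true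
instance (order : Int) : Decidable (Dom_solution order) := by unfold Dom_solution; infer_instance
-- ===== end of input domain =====

-- B counts the digits 3/6/9 arithmetically (abs + %10 / //10) instead of scanning str(order); same result, different decomposition.

-- ===== PORT A =====
def solution (order : Int) : Int :=
  (PySem.Int.toStr order).toList.foldl
    (fun answer i =>
      if i == '3' then answer + 1
      else if i == '6' then answer + 1
      else if i == '9' then answer + 1
      else answer) 0

-- ===== PORT B =====
-- the while-loop of Source B, with (n, answer) as loop state
def solutionAltGo (n : Nat) (answer : Int) : Int :=
  if n = 0 then answer
  else solutionAltGo (n / 10) (if n % 10 = 3 ∨ n % 10 = 6 ∨ n % 10 = 9 then answer + 1 else answer)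
decreasing_by exact Nat.div_lt_self (Nat.pos_of_ne_zero (by assumption)) (by omega)

def solution_alt (order : Int) : Int := solutionAltGo order.natAbs 0

-- ===== PRECONDITION & SPEC =====
def Spec_solution (order : Int) (out : Int) : Prop := out = solution_alt order
instance (order : Int) (out : Int) : Decidable (Spec_solution order out) := by unfold Spec_solution; infer_instance

-- ===== CLAIM (what is proved, stated in full; the proofs are below) =====
def Claim_equal_solution : Prop := ∀ (order : Int), Dom_solution order → Spec_solution order (solution order)

-- ===== LEMMAS AND PROOFS =====

/-- per-character contribution of A's loop body -/
def pvG (c : Char) : Int :=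
  if c == '3' then 1 else if c == '6' then 1 else if c == '9' then 1 else 0

/-- the number of 3/6/9 digits of a natural number (reference function) -/
def pvDc (n : Nat) : Int :=
  if n = 0 then 0
  else (if n % 10 = 3 ∨ n % 10 = 6 ∨ n % 10 = 9 then 1 else 0) + pvDc (n / 10)
decreasing_by exact Nat.div_lt_self (Nat.pos_of_ne_zero (by assumption)) (by omega)

theorem pvG_digitChar (d : Nat) (hd : d < 10) :
    pvG (Nat.digitChar d) = if d = 3 ∨ d = 6 ∨ d = 9 then 1 else 0 := by
  interval_cases d <;> decide

theorem pvDc_pos (n : Nat) (h : n ≠ 0) :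
    pvDc n = (if n % 10 = 3 ∨ n % 10 = 6 ∨ n % 10 = 9 then 1 else 0) + pvDc (n / 10) := by
  rw [pvDc]; simp [h]

theorem pvDc_core (fuel : Nat) : ∀ (n : Nat) (ds : List Char), n < fuel →
    ((Nat.toDigitsCore 10 fuel n ds).map pvG).sum = pvDc n + ((ds.map pvG).sum : Int) := by
  induction fuel with
  | zero => intro n ds h; omega
  | succ fuel ih =>
    intro n ds h
    rw [Nat.toDigitsCore]
    by_cases h0 : n / 10 = 0
    · have hn : n < 10 := by omega
      simp only [h0, if_true, List.map_cons, List.sum_cons]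
      rw [pvG_digitChar _ (Nat.mod_lt _ (by omega))]
      rcases Nat.eq_zero_or_pos n with hz | hp
      · subst hz; simp [pvDc]
      · rw [pvDc_pos n (by omega), h0, Nat.mod_eq_of_lt hn]
        simp [pvDc]
    · have hne : n ≠ 0 := by intro hz; exact h0 (by simp [hz])
      simp only [h0, if_false]
      rw [ih (n / 10) _ (by
        have := Nat.div_lt_self (Nat.pos_of_ne_zero hne) (by omega : (1:Nat) < 10)
        omega)]
      simp only [List.map_cons, List.sum_cons]
      rw [pvG_digitChar _ (Nat.mod_lt _ (by omega))]
      rw [pvDc_pos n hne]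
      ring

theorem pvDc_toDigits (n : Nat) :
    ((Nat.toDigits 10 n).map pvG).sum = pvDc n := by
  have := pvDc_core (n + 1) n [] (by omega)
  simpa [Nat.toDigits] using this

theorem pvFoldl_g (cs : List Char) : ∀ (a : Int),
    cs.foldl (fun answer i =>
      if i == '3' then answer + 1
      else if i == '6' then answer + 1
      else if i == '9' then answer + 1
      else answer) a = a + (cs.map pvG).sum := by
  induction cs with
  | nil => intro a; simp
  | cons c cs ih =>
    intro a
    simp only [List.foldl_cons, List.map_cons, List.sum_cons, ih]
    unfold pvG
    split_ifs <;> ring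

theorem pvAltGo_eq (n : Nat) : ∀ (a : Int), solutionAltGo n a = a + pvDc n := by
  induction n using Nat.strong_induction_on with
  | _ n ih =>
    intro a
    rw [solutionAltGo]
    by_cases h : n = 0
    · simp [h, pvDc]
    · simp only [h, if_false]
      rw [ih (n / 10) (Nat.div_lt_self (Nat.pos_of_ne_zero h) (by omega))]
      rw [pvDc_pos n h]
      split_ifs <;> ring

theorem solution_eq_alt (order : Int) : solution order = solution_alt order := by
  unfold solution solution_alt
  rw [pvAltGo_eq, pvFoldl_g, PySem.Int.toList_toStr]
  unfold PySem.Int.toChars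
  by_cases h : order < 0
  · simp only [h, if_true, List.map_cons, List.sum_cons]
    rw [pvDc_toDigits]
    have hminus : pvG '-' = 0 := by decide
    rw [hminus]; ring
  · simp only [h, if_false]
    rw [pvDc_toDigits]
    have : order.toNat = order.natAbs := by omega
    rw [this]

-- ===== VERDICT (by name: the statement is the Claim_ definition above) =====
theorem solution_spec : Claim_equal_solution := by
  intro order _
  unfold Spec_solution
  exact solution_eq_alt order
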